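-- pv_equiv track=rewrite | github.com/Angeevillor/AI_HEAD | utils/solve_FFT.py | check_layerline
-- ===== SOURCE A (Python) =====
-- def check_layerline(region,lattice):
--     m=len(region)
--     data=[0]*m
--     for i in lattice:
--         for j in range(m):
--             if  (i[1]-region[j][0])*(i[1]-region[j][1])<0:
--                 data[j]+=1
--             else:
--                 pass
--     return data
-- ===== SOURCE B (Python) =====
-- def check_layerline(region, lattice):
--     # Sort the lattice y-values once, then answer each region with two binary searches.
--     ys = sorted(p[1] for p in lattice)
--
--     def _bisect_left(x):
--         lo, hi = 0, len(ys)
--         while lo < hi: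
--             mid = (lo + hi) // 2
--             if ys[mid] < x:
--                 lo = mid + 1
--             else:
--                 hi = mid
--         return lo
--
--     def _bisect_right(x):
--         lo, hi = 0, len(ys)
--         while lo < hi:
--             mid = (lo + hi) // 2
--             if x < ys[mid]:
--                 hi = mid
--             else:
--                 lo = mid + 1
--         return lo
--
--     out = []
--     for r in region:
--         a, b = r[0], r[1]
--         lo, hi = (a, b) if a < b else (b, a)
--         out.append(_bisect_left(hi) - _bisect_right(lo) if lo < hi else 0)
--     return out
-- ===== Notes on version B (the rewrite author's own statement) =====
-- stated objective: faster
-- what changed: Instead of scanning every region for every lattice point, B sorts the lattice y-values once and answers each region by two hand-written binary searches (count strictly between min and max endpoint).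
-- outside the precondition, e.g. on check_layerline([(0,)], []): A returns [0], B raises IndexError
import Mathlib
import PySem

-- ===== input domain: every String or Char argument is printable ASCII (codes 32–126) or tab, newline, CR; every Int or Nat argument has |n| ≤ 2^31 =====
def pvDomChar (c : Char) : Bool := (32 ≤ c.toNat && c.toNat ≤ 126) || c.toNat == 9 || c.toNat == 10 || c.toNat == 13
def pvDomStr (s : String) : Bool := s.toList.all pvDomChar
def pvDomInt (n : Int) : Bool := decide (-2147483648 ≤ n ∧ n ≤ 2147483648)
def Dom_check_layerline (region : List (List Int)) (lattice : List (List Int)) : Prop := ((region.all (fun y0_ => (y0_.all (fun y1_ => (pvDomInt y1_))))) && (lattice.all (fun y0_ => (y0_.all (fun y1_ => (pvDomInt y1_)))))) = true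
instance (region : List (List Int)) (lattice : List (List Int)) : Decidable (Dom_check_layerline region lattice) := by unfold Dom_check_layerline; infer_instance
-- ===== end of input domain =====

-- B sorts the lattice y-values once and answers each region with two hand-written
-- binary searches (count strictly between the ordered endpoints) instead of A's scan
-- of every region for every lattice point; objective: faster.

-- ===== PORT A =====
-- A-side helpers: the test '(i[1]-region[j][0])*(i[1]-region[j][1])<0' and the inner
-- 'for j in range(m)' loop, named so the lemmas can speak about them.
def pvCond (region : List (List Int)) (i : List Int) (j : Int) : Bool :=
  decide ((PySem.List.pyGetD i 1 0 - PySem.List.pyGetD (PySem.List.pyGetD region j []) 0 0) *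
          (PySem.List.pyGetD i 1 0 - PySem.List.pyGetD (PySem.List.pyGetD region j []) 1 0) < 0)

def pvInner (region : List (List Int)) (m : Int) (i : List Int) (data : List Int) : List Int :=
  (PySem.List.pyRange 0 m 1).foldl (fun data j =>
    if pvCond region i j then PySem.List.pySetD data j (PySem.List.pyGetD data j 0 + 1) else data) data

-- literal transliteration: m=len(region); data=[0]*m; for i in lattice: <inner loop>; return data
def check_layerline (region : List (List Int)) (lattice : List (List Int)) : List Int :=
  let m : Int := region.length
  let data : List Int := List.replicate region.length 0
  lattice.foldl (fun data i => pvInner region m i data) data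

-- ===== PORT B =====
-- Source B's hand-written _bisect_left/_bisect_right while-loops are exactly the loops
-- PySem.List.bisectLeft / bisectRight run (same lo/hi/mid state, same comparisons).
def check_layerline_alt (region : List (List Int)) (lattice : List (List Int)) : List Int :=
  let ys : List Int := PySem.List.sorted (lattice.map (fun p => PySem.List.pyGetD p 1 0)) (fun y => y) false
  region.map (fun r =>
    let a := PySem.List.pyGetD r 0 0
    let b := PySem.List.pyGetD r 1 0
    let lohi := if a < b then (a, b) else (b, a)
    if lohi.1 < lohi.2 then
      (PySem.List.bisectLeft ys lohi.2 : Int) - (PySem.List.bisectRight ys lohi.1 : Int)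
    else 0)

-- ===== PRECONDITION & SPEC =====
-- Pre_ excludes rows of length < 2: there the Python programs raise IndexError —
-- A whenever lattice is nonempty, B always (B reads r[0], r[1] even when lattice is
-- empty, where A's [0]*m result never inspects the region rows).
def Pre_check_layerline (region : List (List Int)) (lattice : List (List Int)) : Prop :=
  (∀ r ∈ region, 2 ≤ r.length) ∧ (∀ i ∈ lattice, 2 ≤ i.length)
instance (region : List (List Int)) (lattice : List (List Int)) : Decidable (Pre_check_layerline region lattice) := by unfold Pre_check_layerline; infer_instance

def pvWitness_check_layerline : List (List Int) × List (List Int) := ([[0, 2]], [[5, 1]])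

def Spec_check_layerline (region : List (List Int)) (lattice : List (List Int)) (out : List Int) : Prop := out = check_layerline_alt region lattice
instance (region : List (List Int)) (lattice : List (List Int)) (out : List Int) : Decidable (Spec_check_layerline region lattice out) := by unfold Spec_check_layerline; infer_instance

-- ===== CLAIM (what is proved, stated in full; the proofs are below) =====
def Claim_equal_check_layerline : Prop := ∀ (region : List (List Int)) (lattice : List (List Int)), Dom_check_layerline region lattice → Pre_check_layerline region lattice → Spec_check_layerline region lattice (check_layerline region lattice)

-- ===== LEMMAS AND PROOFS =====

-- counting from a cut index: if p holds exactly on the first n positions, countP = n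
lemma pv_countP_eq_of_cut (p : Int → Bool) :
    ∀ (l : List Int) (n : Nat), n ≤ l.length →
      (∀ j (hj : j < l.length), p l[j] = true ↔ j < n) → l.countP p = n := by
  intro l
  induction l with
  | nil => intro n hn _; have := Nat.le_zero.mp hn; simp [this]
  | cons x t ih =>
    intro n hn h
    cases n with
    | zero =>
      have hx : ¬ p x = true := by
        have := h 0 (by simp)
        simpa using this
      rw [List.countP_cons]
      have ht : t.countP p = 0 := ih 0 (Nat.zero_le _) (by
        intro j hj
        have := h (j+1) (by simpa using Nat.succ_lt_succ hj)
        simpa using this)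
      simp [ht, hx]
    | succ m =>
      have hx : p x = true := by
        have := h 0 (by simp)
        simpa using this
      rw [List.countP_cons]
      have ht : t.countP p = m := ih m (by simpa using hn) (by
        intro j hj
        have := h (j+1) (by simpa using Nat.succ_lt_succ hj)
        simpa using this)
      simp [ht, hx]

lemma pv_bl_eq_countP (l : List Int) (x : Int) (hs : l.Pairwise (· ≤ ·)) :
    l.countP (fun y => decide (y < x)) = PySem.List.bisectLeft l x := by
  obtain ⟨hle, hlt, hge⟩ := PySem.List.bisectLeft_spec l x hs
  refine pv_countP_eq_of_cut _ l _ hle ?_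
  intro j hj
  constructor
  · intro h
    by_contra hnot
    exact absurd (hge j hj (Nat.le_of_not_lt hnot)) (by simpa using h)
  · intro h
    simpa using hlt j hj h

lemma pv_br_eq_countP (l : List Int) (x : Int) (hs : l.Pairwise (· ≤ ·)) :
    l.countP (fun y => decide (y ≤ x)) = PySem.List.bisectRight l x := by
  obtain ⟨hle, hlt, hge⟩ := PySem.List.bisectRight_spec l x hs
  refine pv_countP_eq_of_cut _ l _ hle ?_
  intro j hj
  constructor
  · intro h
    by_contra hnot
    exact absurd (hge j hj (Nat.le_of_not_lt hnot)) (by simpa using h)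
  · intro h
    simpa using hlt j hj h

lemma pv_prod_neg_iff (y a b : Int) :
    (y - a) * (y - b) < 0 ↔ (min a b < y ∧ y < max a b) := by
  rw [mul_neg_iff]; omega

lemma pv_countP_sub (p q r : Int → Bool)
    (h : ∀ y, (if p y then (1 : Int) else 0) - (if q y then 1 else 0) = if r y then 1 else 0) :
    ∀ l : List Int, ((l.countP p : Nat) : Int) - ((l.countP q : Nat) : Int) = ((l.countP r : Nat) : Int) := by
  intro l
  induction l with
  | nil => simp
  | cons y t ih =>
    have h' := h y
    simp only [List.countP_cons]
    cases hp : p y <;> cases hq : q y <;> cases hr : r y <;>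
      simp [hp, hq, hr] at h' ⊢ <;> omega

lemma pv_count_between (a b : Int) (hab : a ≠ b) (l : List Int) :
    ((l.countP (fun y => decide (y < max a b)) : Nat) : Int)
      - ((l.countP (fun y => decide (y ≤ min a b)) : Nat) : Int)
    = ((l.countP (fun y => decide ((y - a) * (y - b) < 0)) : Nat) : Int) := by
  apply pv_countP_sub
  intro y
  simp only [decide_eq_true_eq, pv_prod_neg_iff]
  split_ifs <;> omega

-- inner loop characterization: one pass of 'for j in range(m)' adds the indicator
lemma pv_innerAux (region : List (List Int)) (i : List Int) (n : Nat) :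
    ∀ (fuel k : Nat) (d : List Int), k + fuel = n → d.length = n →
      (PySem.List.pyRange (k : Int) (n : Int) 1).foldl
        (fun data j =>
          if pvCond region i j then PySem.List.pySetD data j (PySem.List.pyGetD data j 0 + 1) else data) d
      = d.mapIdx (fun j x => if k ≤ j ∧ pvCond region i (j : Int) then x + 1 else x) := by
  intro fuel
  induction fuel with
  | zero =>
    intro k d hk hd
    rw [PySem.List.pyRange_one_eq_nil (by omega)]
    apply List.ext_getElem (by simp)
    intro t ht1 ht2
    simp only [List.getElem_mapIdx]
    have : ¬ (k ≤ t ∧ pvCond region i (t : Int) = true) := by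
      rintro ⟨hkt, -⟩
      simp at ht2
      omega
    simp [this]
  | succ fuel ih =>
    intro k d hk hd
    have hkn : (k : Int) < (n : Int) := by exact_mod_cast (by omega : k < n)
    rw [PySem.List.pyRange_one_cons hkn, List.foldl_cons]
    have hstep :
        (if pvCond region i (k : Int) then
            PySem.List.pySetD d (k : Int) (PySem.List.pyGetD d (k : Int) 0 + 1) else d)
        = (if pvCond region i (k : Int) then d.set k (d[k]'(by omega) + 1) else d) := by
      split
      · rw [PySem.List.pySetD_natCast, PySem.List.pyGetD_natCast,
            List.getD_eq_getElem d 0 (by omega)]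
      · rfl
    have hcast : ((k : Int) + 1) = ((k + 1 : Nat) : Int) := by push_cast; ring
    rw [hstep, hcast]
    have hlen : (if pvCond region i (k : Int) then d.set k (d[k]'(by omega) + 1) else d).length = n := by
      split <;> simp [hd]
    rw [ih (k+1) _ (by omega) hlen]
    apply List.ext_getElem (by simp [hlen, hd])
    intro t ht1 ht2
    simp only [List.getElem_mapIdx]
    have hlt : t < d.length := by simp [hlen] at ht1; omega
    by_cases htk : t = k
    · subst htk
      have : ¬ (t + 1 ≤ t ∧ pvCond region i (t : Int) = true) := by omega
      rw [if_neg this]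
      by_cases hc : pvCond region i (t : Int) = true
      · simp only [hc, if_true, and_true, List.getElem_set_self]
        rw [if_pos (Nat.le_refl t)]
      · simp [hc]
    · have hget : (if pvCond region i (k : Int) then d.set k (d[k]'(by omega) + 1) else d)[t]'(by simpa [hlen] using ht1) = d[t] := by
        split
        · exact List.getElem_set_ne (by omega : k ≠ t) _
        · rfl
      rw [hget]
      by_cases hc : pvCond region i (t : Int) = true
      · by_cases hkt : k ≤ t
        · rw [if_pos ⟨by omega, hc⟩, if_pos ⟨hkt, hc⟩]
        · rw [if_neg (by omega), if_neg (by rintro ⟨h, -⟩; omega)]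
      · simp [hc]

lemma pv_inner_eq (region : List (List Int)) (i : List Int) (d : List Int)
    (hd : d.length = region.length) :
    pvInner region (region.length : Int) i d
      = d.mapIdx (fun j x => if pvCond region i (j : Int) then x + 1 else x) := by
  unfold pvInner
  have haux := pv_innerAux region i region.length region.length 0 d (by omega) hd
  rw [Nat.cast_zero] at haux
  rw [haux]
  apply List.ext_getElem (by simp)
  intro t ht1 ht2
  simp only [List.getElem_mapIdx]
  simp

-- outer loop characterization: the lattice fold adds the per-region counts pointwise
lemma pv_outer (region : List (List Int)) :
    ∀ (lat : List (List Int)) (d : List Int), d.length = region.length →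
      lat.foldl (fun d i => pvInner region (region.length : Int) i d) d
      = d.mapIdx (fun j x => x + ((lat.countP (fun i => pvCond region i (j : Int))) : Int)) := by
  intro lat
  induction lat with
  | nil =>
    intro d hd
    apply List.ext_getElem (by simp)
    intro t ht1 ht2
    simp
  | cons i rest ih =>
    intro d hd
    rw [List.foldl_cons, ih _ (by rw [pv_inner_eq region i d hd]; simp [hd]),
        pv_inner_eq region i d hd]
    apply List.ext_getElem (by simp [hd])
    intro t ht1 ht2
    simp only [List.getElem_mapIdx, List.countP_cons]
    by_cases hc : pvCond region i (t : Int) = true <;> simp [hc, add_comm, add_assoc, add_left_comm]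

-- B's per-region value equals the straight count over the lattice y-values
lemma pv_B_pointwise (ysAll : List Int) (a b : Int) :
    (let ys := PySem.List.sorted ysAll (fun y => y) false
     let lohi := if a < b then (a, b) else (b, a)
     if lohi.1 < lohi.2 then
       (PySem.List.bisectLeft ys lohi.2 : Int) - (PySem.List.bisectRight ys lohi.1 : Int)
     else 0)
    = ((ysAll.countP (fun y => decide ((y - a) * (y - b) < 0))) : Int) := by
  have hperm : (PySem.List.sorted ysAll (fun y => y) false).Perm ysAll :=
    PySem.List.sorted_perm ysAll (fun y => y) false
  have hpair : (PySem.List.sorted ysAll (fun y => y) false).Pairwise (· ≤ ·) := by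
    simpa using PySem.List.sorted_pairwise ysAll (fun y => y)
  set ys := PySem.List.sorted ysAll (fun y => y) false with hys
  by_cases hab : a = b
  · subst hab
    have h0 : ysAll.countP (fun y => decide ((y - a) * (y - a) < 0)) = 0 := by
      rw [List.countP_eq_zero]
      intro y _
      simpa using mul_self_nonneg (y - a)
    simp [h0]
  · have key : ((ys.countP (fun y => decide (y < max a b))) : Int)
        - ((ys.countP (fun y => decide (y ≤ min a b))) : Int)
        = ((ysAll.countP (fun y => decide ((y - a) * (y - b) < 0))) : Int) := by
      rw [pv_count_between a b hab ys,
          hperm.countP_eq (fun y => decide ((y - a) * (y - b) < 0))]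
    rw [← key, pv_bl_eq_countP ys (max a b) hpair, pv_br_eq_countP ys (min a b) hpair]
    rcases lt_trichotomy a b with h | h | h
    · simp only [if_pos h]
      rw [max_eq_right (le_of_lt h), min_eq_left (le_of_lt h)]
    · exact absurd h hab
    · simp only [if_neg (not_lt.mpr (le_of_lt h))]
      simp only [if_pos h]
      rw [max_eq_left (le_of_lt h), min_eq_right (le_of_lt h)]

-- ===== VERDICT (by name: the statement is the Claim_ definition above) =====
theorem check_layerline_spec : Claim_equal_check_layerline := by
  intro region lattice _ _
  unfold Spec_check_layerline check_layerline check_layerline_alt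
  rw [pv_outer region lattice (List.replicate region.length 0) (by simp)]
  apply List.ext_getElem (by simp)
  intro j hj1 hj2
  have hjr : j < region.length := by simpa using hj2
  simp only [List.getElem_mapIdx, List.getElem_map, List.getElem_replicate]
  rw [pv_B_pointwise (lattice.map (fun p => PySem.List.pyGetD p 1 0))
        (PySem.List.pyGetD region[j] 0 0) (PySem.List.pyGetD region[j] 1 0)]
  rw [List.countP_map, zero_add]
  have hcnt : List.countP (fun i => pvCond region i (j : Int)) lattice
      = List.countP ((fun y => decide ((y - PySem.List.pyGetD region[j] 0 0) * (y - PySem.List.pyGetD region[j] 1 0) < 0)) ∘ fun p => PySem.List.pyGetD p 1 0) lattice := by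
    apply List.countP_congr
    intro i _
    unfold pvCond
    rw [PySem.List.pyGetD_natCast, List.getD_eq_getElem region [] hjr]
    simp
  rw [hcnt]
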